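-- pv_equiv track=rewrite | github.com/ducthang-vu/codewars | python/25_Range_Extraction/solution.py | solution
-- ===== SOURCE A (Python) =====
-- def solution(args):
--     result = []
--     temp = {
--         'range': [args[0]],
--         'asc': None,
--     }
--
--     def add_to_result():
--         if len(temp['range']) >= 3:
--             to_add = [temp['range'][0]] if temp['range'][0] == temp['range'][-1] else [temp['range'][0],
--                                                                                        temp['range'][-1]]
--             result.append('-'.join(map(str, to_add)))
--         else:
--             result.append(','.join(map(str, temp['range'])))
--         temp['range'] = [item]
--         temp['asc'] = None
--
--     for item in args[1:]:
--         try: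
--             last = temp['range'][-1]
--             if temp['asc'] is None:
--                 if item == last + 1:
--                     temp['asc'] = True
--                     temp['range'].append(item)
--                 elif item == last - 1:
--                     temp['asc'] = False
--                     temp['range'].append(item)
--                 else:
--                     add_to_result()
--             elif temp['asc']:
--                 if item == last + 1:
--                     temp['asc'] = True
--                     temp['range'].append(item)
--                 else:
--                     add_to_result()
--             else:
--                 if item == last - 1:
--                     temp['asc'] = False
--                     temp['range'].append(item)
--                 else:
--                     add_to_result()
--         except IndexError:
--             temp['range'].append(item)
--
--     add_to_result()
--     return ','.join(result)
-- ===== SOURCE B (Python) =====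
-- def solution(args):
--     # Differences-and-boundaries: compute the adjacent-difference sequence, mark the
--     # run boundaries in it, then format each boundary-delimited segment by its endpoints.
--     diffs = [b - a for a, b in zip(args, args[1:])]
--     bounds = [0]
--     for i, d in enumerate(diffs):
--         if not (d in (1, -1) and (bounds[-1] == i or d == diffs[i - 1])):
--             bounds.append(i + 1)
--     bounds.append(len(args))
--     pieces = []
--     for s, e in zip(bounds, bounds[1:]):
--         if e - s >= 3:
--             pieces.append(f"{args[s]}-{args[e - 1]}")
--         else:
--             pieces.append(",".join(map(str, args[s:e])))
--     return ",".join(pieces)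
-- ===== Notes on version B (the rewrite author's own statement) =====
-- stated objective: alternative
-- what changed: Replaces A's per-element state machine (mutable dict with a growing run list, an asc flag and a result-appending closure) by a difference-sequence algorithm: compute adjacent differences with zip, mark the run boundaries inside that sequence, then format each boundary-delimited segment directly from its endpoint indices.
-- outside the precondition, e.g. on solution([]): A raises IndexError, B returns ''; on solution([5]): A raises NameError, B returns '5'
import Mathlib
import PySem

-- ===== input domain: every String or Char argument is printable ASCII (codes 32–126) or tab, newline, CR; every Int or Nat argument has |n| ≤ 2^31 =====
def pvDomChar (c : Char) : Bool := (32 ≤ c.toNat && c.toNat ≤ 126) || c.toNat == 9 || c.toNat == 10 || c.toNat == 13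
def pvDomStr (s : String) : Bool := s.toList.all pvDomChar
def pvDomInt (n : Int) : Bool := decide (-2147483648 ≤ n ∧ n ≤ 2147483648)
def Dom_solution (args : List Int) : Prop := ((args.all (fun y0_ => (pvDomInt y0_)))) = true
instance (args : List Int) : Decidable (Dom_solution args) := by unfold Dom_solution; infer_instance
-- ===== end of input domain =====

-- B replaces A's per-element state machine (mutable dict with a growing run list, an asc flag and
-- a flush closure) by a difference-sequence algorithm: adjacent differences, then run boundaries
-- marked in them, then each boundary-delimited segment formatted from its endpoints; objective:
-- alternative decomposition, return-value equivalence only (neither version mutates its argument).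

-- ===== PORT A =====
-- add_to_result: the appended piece depends only on temp['range']; the reset uses the loop
-- variable 'item', handled at each call site.  range[0]/range[-1] are read with .getD 0: every
-- call site has a non-empty range, so this matches Python exactly on reachable states.
def solFmtA (rng : List Int) : String :=
  if 3 ≤ rng.length then
    let first := (PySem.List.pyGet? rng 0).getD 0
    let last := (PySem.List.pyGet? rng (-1)).getD 0
    let to_add := if first = last then [first] else [first, last]
    PySem.Str.join "-" (to_add.map PySem.Int.toStr)
  else
    PySem.Str.join "," (rng.map PySem.Int.toStr)

-- one iteration of A's for-loop; state = (result, temp['range'], temp['asc'])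
def solStepA (st : List String × List Int × Option Bool) (item : Int) :
    List String × List Int × Option Bool :=
  match PySem.List.pyGet? st.2.1 (-1) with
  | none => (st.1, st.2.1 ++ [item], st.2.2)      -- except IndexError branch
  | some last =>
    match st.2.2 with
    | none =>
      if item = last + 1 then (st.1, st.2.1 ++ [item], some true)
      else if item = last - 1 then (st.1, st.2.1 ++ [item], some false)
      else (st.1 ++ [solFmtA st.2.1], [item], none)
    | some true =>
      if item = last + 1 then (st.1, st.2.1 ++ [item], some true)
      else (st.1 ++ [solFmtA st.2.1], [item], none)
    | some false =>
      if item = last - 1 then (st.1, st.2.1 ++ [item], some false)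
      else (st.1 ++ [solFmtA st.2.1], [item], none)

def solution (args : List Int) : String :=
  match args with
  | [] => ""          -- Python raises IndexError on args[0]; excluded by Pre_solution
  | a0 :: rest =>
    let st := rest.foldl solStepA ([], [a0], none)
    -- final add_to_result: its reset of temp (which reads 'item') is dead; only the append matters
    PySem.Str.join "," (st.1 ++ [solFmtA st.2.1])

-- ===== PORT B =====
-- diffs = [b - a for a, b in zip(args, args[1:])]
def solDiffs (args : List Int) : List Int :=
  (args.zip args.tail).map (fun p => p.2 - p.1)

-- one iteration of B's boundary-marking loop over enumerate(diffs)
def solBndStep (diffs : List Int) (b : List Int) (pr : Int × Int) : List Int :=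
  if ¬((pr.2 = 1 ∨ pr.2 = -1) ∧
       ((PySem.List.pyGet? b (-1)).getD 0 = pr.1 ∨
        pr.2 = (PySem.List.pyGet? diffs (pr.1 - 1)).getD 0)) then
    b ++ [pr.1 + 1]
  else b

-- one piece of B's second loop; f"{args[s]}-{args[e-1]}" is ported as a '-'-join of the two
-- rendered ints (exact).  args[s]/args[e-1] read with .getD 0: all pairs passed in have
-- 0 ≤ s < e ≤ len(args) except the degenerate (0,0) pair on empty input, where the ≥3 branch
-- is not taken, so this matches Python exactly.
def solPiece (args : List Int) (s e : Int) : String :=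
  if 3 ≤ e - s then
    PySem.Str.join "-" [PySem.Int.toStr ((PySem.List.pyGet? args s).getD 0),
                        PySem.Int.toStr ((PySem.List.pyGet? args (e - 1)).getD 0)]
  else
    PySem.Str.join "," ((PySem.List.slice args (some s) (some e)).map PySem.Int.toStr)

def solution_alt (args : List Int) : String :=
  let diffs := solDiffs args
  let bounds := (PySem.List.enumerate diffs 0).foldl (solBndStep diffs) [0]
  let bounds2 := bounds ++ [PySem.List.len args]
  let pieces := (bounds2.zip bounds2.tail).map (fun pr => solPiece args pr.1 pr.2)
  PySem.Str.join "," pieces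

-- ===== PRECONDITION & SPEC =====
-- Pre_ excludes args of length < 2: Python A raises there — IndexError on [] and NameError
-- ('item' unbound in add_to_result) on single-element lists; B naturally returns "" / the
-- single number there instead.
def Pre_solution (args : List Int) : Prop := 2 ≤ args.length
instance (args : List Int) : Decidable (Pre_solution args) := by unfold Pre_solution; infer_instance
def pvWitness_solution : List Int := ([1, 2, 3, 5])

def Spec_solution (args : List Int) (out : String) : Prop := out = solution_alt args
instance (args : List Int) (out : String) : Decidable (Spec_solution args out) := by unfold Spec_solution; infer_instance

-- ===== CLAIM (what is proved, stated in full; the proofs are below) =====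
def Claim_equal_solution : Prop := ∀ (args : List Int), Dom_solution args → Pre_solution args → Spec_solution args (solution args)


-- ===== LEMMAS AND PROOFS =====

-- args[j] and diffs[j] with default 0 (proof-side abbreviations)
def aD (args : List Int) (j : Nat) : Int := args.getD j 0
def dgD (args : List Int) (j : Nat) : Int := (solDiffs args).getD j 0
-- the run segment args[s:k+1] as the ports build it
def runSeg (args : List Int) (s k : Nat) : List Int := (args.drop s).take (k + 1 - s)
-- the formatted pieces for the completed runs recorded in a bounds list
def solPieces (args b : List Int) : List String :=
  (b.zip b.tail).map (fun pr => solPiece args pr.1 pr.2)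

theorem length_solDiffs (args : List Int) : (solDiffs args).length = args.length - 1 := by
  simp [solDiffs, List.length_zip, List.length_tail]

theorem dg_eq (args : List Int) (j : Nat) (h : j + 1 < args.length) :
    dgD args j = aD args (j + 1) - aD args j := by
  have hj : j < (args.zip args.tail).length := by
    simp [List.length_zip, List.length_tail]; omega
  have hj1 : j < args.length := by omega
  have hjt : j < args.tail.length := by simp [List.length_tail]; omega
  unfold dgD solDiffs aD
  rw [List.getD_eq_getElem _ _ (by simpa using hj), List.getElem_map, List.getElem_zip,
    List.getD_eq_getElem _ _ h, List.getD_eq_getElem _ _ hj1]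
  simp [List.getElem_tail]

theorem dgD_get? (args : List Int) (j : Nat) (h : j < (solDiffs args).length) :
    (solDiffs args)[j]? = some (dgD args j) := by
  rw [List.getElem?_eq_getElem h]; unfold dgD; rw [List.getD_eq_getElem _ _ h]

theorem runSeg_length (args : List Int) (s k : Nat) (hs : s ≤ k) (hk : k < args.length) :
    (runSeg args s k).length = k + 1 - s := by
  simp [runSeg, List.length_take, List.length_drop]; omega

theorem runSeg_get0 (args : List Int) (s k : Nat) (hs : s ≤ k) (hk : k < args.length) :
    (runSeg args s k)[0]? = some (aD args s) := by
  have hsl : s < args.length := by omega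
  unfold runSeg
  rw [List.getElem?_take_of_lt (by omega), List.getElem?_drop, Nat.add_zero,
    List.getElem?_eq_getElem hsl]
  unfold aD; rw [List.getD_eq_getElem _ _ hsl]

theorem runSeg_last (args : List Int) (s k : Nat) (hs : s ≤ k) (hk : k < args.length) :
    (runSeg args s k).getLast? = some (aD args k) := by
  rw [List.getLast?_eq_getElem?, runSeg_length args s k hs hk]
  unfold runSeg
  rw [List.getElem?_take_of_lt (by omega), List.getElem?_drop,
    (by omega : s + (k + 1 - s - 1) = k), List.getElem?_eq_getElem hk]
  unfold aD; rw [List.getD_eq_getElem _ _ hk]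

theorem runSeg_singleton (args : List Int) (k : Nat) (hk : k < args.length) :
    runSeg args k k = [aD args k] := by
  unfold runSeg
  rw [(by omega : k + 1 - k = 0 + 1), List.take_add_one, List.take_zero, List.getElem?_drop,
    Nat.add_zero, List.getElem?_eq_getElem hk]
  unfold aD; rw [List.getD_eq_getElem _ _ hk]; rfl

theorem runSeg_extend (args : List Int) (s k : Nat) (hs : s ≤ k + 1) (hk : k + 1 < args.length) :
    runSeg args s k ++ [aD args (k + 1)] = runSeg args s (k + 1) := by
  unfold runSeg
  rw [(by omega : k + 1 + 1 - s = (k + 1 - s) + 1), List.take_add_one, List.getElem?_drop,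
    (by omega : s + (k + 1 - s) = k + 1), List.getElem?_eq_getElem hk]
  unfold aD; rw [List.getD_eq_getElem _ _ hk]; rfl

theorem run_val (args : List Int) (s : Nat) :
    ∀ k, s ≤ k → k < args.length → (∀ j, s ≤ j → j < k → dgD args j = dgD args s) →
      aD args k = aD args s + dgD args s * ((k : Int) - (s : Int)) := by
  intro k hk
  induction k, hk using Nat.le_induction with
  | base => intro _ _; simp
  | succ k hk ih =>
    intro hlen hconst
    have h1 := dg_eq args k hlen
    have h2 := ih (by omega) (fun j hj hj2 => hconst j hj (by omega))
    have h3 := hconst k hk (by omega)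
    have : aD args (k + 1) = aD args k + dgD args k := by omega
    rw [this, h2, h3]; push_cast; ring

theorem zipTail_append (b : List Int) (x l : Int) (h : b.getLast? = some l) :
    (b ++ [x]).zip ((b ++ [x]).tail) = b.zip b.tail ++ [(l, x)] := by
  induction b generalizing l with
  | nil => simp at h
  | cons a b' ih =>
    cases b' with
    | nil => simp at h; subst h; rfl
    | cons c b'' =>
      have h' : (c :: b'').getLast? = some l := by
        rwa [List.getLast?_cons_cons] at h
      have hih := ih l h'
      simp only [List.cons_append, List.zip_cons_cons, List.tail_cons] at hih ⊢
      rw [hih]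

theorem solPieces_append (args b : List Int) (x l : Int) (h : b.getLast? = some l) :
    solPieces args (b ++ [x]) = solPieces args b ++ [solPiece args l x] := by
  unfold solPieces
  rw [zipTail_append b x l h, List.map_append]; rfl

-- the flushed run and the pieced segment render identically
theorem fmt_piece (args : List Int) (s k : Nat) (hs : s ≤ k) (hk : k < args.length)
    (hconst : ∀ j, s ≤ j → j < k → dgD args j = dgD args s)
    (hdir : s < k → dgD args s = 1 ∨ dgD args s = -1) :
    solFmtA (runSeg args s k) = solPiece args (s : Int) ((k : Int) + 1) := by
  have hlen := runSeg_length args s k hs hk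
  unfold solFmtA solPiece
  by_cases h3 : 3 ≤ k + 1 - s
  · have h3' : 3 ≤ (runSeg args s k).length := by omega
    have h3'' : (3 : Int) ≤ (k : Int) + 1 - (s : Int) := by omega
    rw [if_pos h3', if_pos h3'']
    have hfirst : (PySem.List.pyGet? (runSeg args s k) 0).getD 0 = aD args s := by
      rw [PySem.List.pyGet?_zero, runSeg_get0 args s k hs hk]; rfl
    have hlast : (PySem.List.pyGet? (runSeg args s k) (-1)).getD 0 = aD args k := by
      rw [PySem.List.pyGet?_neg_one, runSeg_last args s k hs hk]; rfl
    have hslt : s < k := by omega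
    have hval := run_val args s k hs hk hconst
    have hne : aD args s ≠ aD args k := by
      rcases hdir hslt with hd | hd <;> rw [hd] at hval <;> intro hcontra <;> omega
    simp only [hfirst, hlast]
    rw [if_neg hne]
    have hgs : (PySem.List.pyGet? args (s : Int)).getD 0 = aD args s := by
      rw [PySem.List.pyGet?_natCast, List.getElem?_eq_getElem (by omega : s < args.length)]
      unfold aD; rw [List.getD_eq_getElem _ _ (by omega : s < args.length)]; rfl
    have hek : (k : Int) + 1 - 1 = ((k : Nat) : Int) := by ring
    have hgk : (PySem.List.pyGet? args ((k : Int) + 1 - 1)).getD 0 = aD args k := by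
      rw [hek, PySem.List.pyGet?_natCast, List.getElem?_eq_getElem hk]
      unfold aD; rw [List.getD_eq_getElem _ _ hk]; rfl
    rw [hgs, hgk]; rfl
  · have h3' : ¬ 3 ≤ (runSeg args s k).length := by omega
    have h3'' : ¬ (3 : Int) ≤ (k : Int) + 1 - (s : Int) := by omega
    rw [if_neg h3', if_neg h3'']
    have he2 : (k : Int) + 1 = ((k + 1 : Nat) : Int) := by push_cast; ring
    rw [he2, PySem.List.slice_natCast]; rfl

-- the loop invariant: after k iterations, A's state and B's bounds list describe the same
-- run decomposition (s = start index of the open run)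
def SolInv (args : List Int) (k : Nat) (st : List String × List Int × Option Bool)
    (b : List Int) : Prop :=
  ∃ s : Nat, s ≤ k ∧ k < args.length ∧
    b.getLast? = some (s : Int) ∧
    st.2.1 = runSeg args s k ∧
    st.1 = solPieces args b ∧
    (st.2.2 = none ↔ k = s) ∧
    (∀ j, s ≤ j → j < k → dgD args j = dgD args s) ∧
    (s < k → (dgD args s = 1 ∧ st.2.2 = some true) ∨ (dgD args s = -1 ∧ st.2.2 = some false))

theorem stepA_none_eval (res : List String) (rng : List Int) (item L : Int)
    (h : rng.getLast? = some L) :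
    solStepA (res, rng, none) item =
      (if item = L + 1 then (res, rng ++ [item], some true)
       else if item = L - 1 then (res, rng ++ [item], some false)
       else (res ++ [solFmtA rng], [item], none)) := by
  simp only [solStepA, PySem.List.pyGet?_neg_one, h]

theorem stepA_true_eval (res : List String) (rng : List Int) (item L : Int)
    (h : rng.getLast? = some L) :
    solStepA (res, rng, some true) item =
      (if item = L + 1 then (res, rng ++ [item], some true)
       else (res ++ [solFmtA rng], [item], none)) := by
  simp only [solStepA, PySem.List.pyGet?_neg_one, h]

theorem stepA_false_eval (res : List String) (rng : List Int) (item L : Int)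
    (h : rng.getLast? = some L) :
    solStepA (res, rng, some false) item =
      (if item = L - 1 then (res, rng ++ [item], some false)
       else (res ++ [solFmtA rng], [item], none)) := by
  simp only [solStepA, PySem.List.pyGet?_neg_one, h]

theorem stepB_eval (diffs b : List Int) (i d sL : Int) (h : b.getLast? = some sL) :
    solBndStep diffs b (i, d) =
      (if ¬((d = 1 ∨ d = -1) ∧
            (sL = i ∨ d = (PySem.List.pyGet? diffs (i - 1)).getD 0))
       then b ++ [i + 1] else b) := by
  simp only [solBndStep, PySem.List.pyGet?_neg_one, h, Option.getD_some]

theorem inv_step (args : List Int) (k : Nat) (res : List String) (rng : List Int)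
    (asc : Option Bool) (b : List Int) (hk1 : k + 1 < args.length)
    (h : SolInv args k (res, rng, asc) b) :
    SolInv args (k + 1) (solStepA (res, rng, asc) (aD args (k + 1)))
      (solBndStep (solDiffs args) b ((k : Int), dgD args k)) := by
  obtain ⟨s, hs, hk, hblast, hrng, hres, hnone, hconst, hdir⟩ := h
  simp only at hrng hres hnone hdir
  have hdval : dgD args k = aD args (k + 1) - aD args k := dg_eq args k hk1
  have hrlast : rng.getLast? = some (aD args k) := by
    rw [hrng]; exact runSeg_last args s k hs hk
  rw [stepB_eval (solDiffs args) b _ _ _ hblast]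
  -- the flushed-state invariant, shared by all break branches
  have hnew : SolInv args (k + 1) (res ++ [solFmtA rng], [aD args (k + 1)], none)
      (b ++ [(k : Int) + 1]) := by
    refine ⟨k + 1, le_refl _, hk1, ?_, ?_, ?_, by simp, ?_, ?_⟩
    · rw [List.getLast?_concat]; norm_num
    · simp only; rw [runSeg_singleton args (k + 1) hk1]
    · simp only
      rw [hres, hrng, solPieces_append args b _ _ hblast,
        fmt_piece args s k hs hk hconst ?_]
      intro hslt
      rcases hdir hslt with ⟨hd, _⟩ | ⟨hd, _⟩
      · exact Or.inl hd
      · exact Or.inr hd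
    · intro j hj hj2; omega
    · intro hcontra; omega
  cases asc with
  | none =>
    have hse : k = s := hnone.mp rfl
    subst hse
    rw [stepA_none_eval res rng _ _ hrlast]
    by_cases h1 : aD args (k + 1) = aD args k + 1
    · have hd1 : dgD args k = 1 := by omega
      rw [if_pos h1, if_neg (not_not_intro ⟨Or.inl hd1, Or.inl rfl⟩)]
      refine ⟨k, by omega, hk1, hblast, ?_, hres, ?_, ?_, ?_⟩
      · simp only; rw [hrng]; exact runSeg_extend args k k (by omega) hk1
      · refine ⟨fun hh => by simp at hh, fun hh => absurd hh (by omega)⟩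
      · intro j hj hj2
        have : j = k := by omega
        rw [this]
      · intro _; exact Or.inl ⟨hd1, rfl⟩
    · by_cases h2 : aD args (k + 1) = aD args k - 1
      · have hd2 : dgD args k = -1 := by omega
        rw [if_neg h1, if_pos h2, if_neg (not_not_intro ⟨Or.inr hd2, Or.inl rfl⟩)]
        refine ⟨k, by omega, hk1, hblast, ?_, hres, ?_, ?_, ?_⟩
        · simp only; rw [hrng]; exact runSeg_extend args k k (by omega) hk1
        · refine ⟨fun hh => by simp at hh, fun hh => absurd hh (by omega)⟩
        · intro j hj hj2
          have : j = k := by omega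
          rw [this]
        · intro _; exact Or.inr ⟨hd2, rfl⟩
      · rw [if_neg h1, if_neg h2, if_pos (fun ⟨hor, _⟩ => by rcases hor with hd | hd <;> omega)]
        exact hnew
  | some c =>
    have hslt : s < k := by
      rcases Nat.lt_or_ge s k with h' | h'
      · exact h'
      · exact absurd (hnone.mpr (by omega)) (by simp)
    have hkm1 : ((k : Int) - 1) = ((k - 1 : Nat) : Int) := by omega
    have hkm1lt : k - 1 < (solDiffs args).length := by
      rw [length_solDiffs]; omega
    have hdg : (PySem.List.pyGet? (solDiffs args) ((k : Int) - 1)).getD 0 = dgD args s := by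
      rw [hkm1, PySem.List.pyGet?_natCast, dgD_get? args (k - 1) hkm1lt, Option.getD_some]
      exact hconst (k - 1) (by omega) (by omega)
    have hsk : ¬ ((s : Int) = (k : Int)) := by omega
    rcases hdir hslt with ⟨hds, hasc⟩ | ⟨hds, hasc⟩ <;>
      [skip; skip]
    · -- ascending run: asc = some true, dgD s = 1
      rw [hasc] at *
      injection hasc with hc
      rw [stepA_true_eval res rng _ _ hrlast]
      by_cases h1 : aD args (k + 1) = aD args k + 1
      · have hd1 : dgD args k = 1 := by omega
        rw [if_pos h1,
          if_neg (not_not_intro ⟨Or.inl hd1, Or.inr (by rw [hdg, hds, hd1])⟩)]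
        refine ⟨s, by omega, hk1, hblast, ?_, hres, ?_, ?_, ?_⟩
        · simp only; rw [hrng]; exact runSeg_extend args s k (by omega) hk1
        · refine ⟨fun hh => by simp at hh, fun hh => absurd hh (by omega)⟩
        · intro j hj hj2
          rcases Nat.lt_or_ge j k with hjk | hjk
          · exact hconst j hj hjk
          · have : j = k := by omega
            rw [this, hd1, hds]
        · intro _; exact Or.inl ⟨hds, rfl⟩
      · have hdne : dgD args k ≠ 1 := by omega
        rw [if_neg h1, if_pos ?_]
        · exact hnew
        · rintro ⟨hor, hsecond⟩
          rcases hsecond with hc2 | hc2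
          · exact hsk hc2
          · rw [hdg, hds] at hc2; exact hdne hc2
    · -- descending run: asc = some false, dgD s = -1
      rw [hasc] at *
      rw [stepA_false_eval res rng _ _ hrlast]
      by_cases h1 : aD args (k + 1) = aD args k - 1
      · have hd1 : dgD args k = -1 := by omega
        rw [if_pos h1,
          if_neg (not_not_intro ⟨Or.inr hd1, Or.inr (by rw [hdg, hds, hd1])⟩)]
        refine ⟨s, by omega, hk1, hblast, ?_, hres, ?_, ?_, ?_⟩
        · simp only; rw [hrng]; exact runSeg_extend args s k (by omega) hk1
        · refine ⟨fun hh => by simp at hh, fun hh => absurd hh (by omega)⟩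
        · intro j hj hj2
          rcases Nat.lt_or_ge j k with hjk | hjk
          · exact hconst j hj hjk
          · have : j = k := by omega
            rw [this, hd1, hds]
        · intro _; exact Or.inr ⟨hds, rfl⟩
      · have hdne : dgD args k ≠ -1 := by omega
        rw [if_neg h1, if_pos ?_]
        · exact hnew
        · rintro ⟨hor, hsecond⟩
          rcases hsecond with hc2 | hc2
          · exact hsk hc2
          · rw [hdg, hds] at hc2; exact hdne hc2

theorem aD_cons_succ (x : Int) (l : List Int) (j : Nat) : aD (x :: l) (j + 1) = aD l j := by
  simp [aD]

theorem inv_all (a0 : Int) (rest : List Int) :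
    ∀ k, k ≤ rest.length →
      SolInv (a0 :: rest) k ((rest.take k).foldl solStepA ([], [a0], none))
        (((PySem.List.enumerate (solDiffs (a0 :: rest)) 0).take k).foldl
          (solBndStep (solDiffs (a0 :: rest))) [0]) := by
  intro k
  induction k with
  | zero =>
    intro _
    simp only [List.take_zero, List.foldl_nil]
    refine ⟨0, le_refl _, by simp, rfl, ?_, rfl, by simp, ?_, ?_⟩
    · simp only; rw [runSeg_singleton (a0 :: rest) 0 (by simp)]; rfl
    · intro j hj hj2; omega
    · intro hc; omega
  | succ k ih =>
    intro hk1
    have hklt : k < rest.length := by omega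
    have hinv := ih (by omega)
    have hdlen : (solDiffs (a0 :: rest)).length = rest.length := by
      rw [length_solDiffs]; simp
    have htakeA : rest.take (k + 1) = rest.take k ++ [aD (a0 :: rest) (k + 1)] := by
      rw [List.take_add_one, List.getElem?_eq_getElem hklt, aD_cons_succ]
      unfold aD; rw [List.getD_eq_getElem _ _ hklt]; rfl
    have htakeB : (PySem.List.enumerate (solDiffs (a0 :: rest)) 0).take (k + 1) =
        (PySem.List.enumerate (solDiffs (a0 :: rest)) 0).take k ++
          [((k : Int), dgD (a0 :: rest) k)] := by
      rw [List.take_add_one, PySem.List.getElem?_enumerate,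
        dgD_get? (a0 :: rest) k (by omega : k < (solDiffs (a0 :: rest)).length)]
      simp
    rw [htakeA, htakeB, List.foldl_append, List.foldl_append, List.foldl_cons, List.foldl_nil,
      List.foldl_cons, List.foldl_nil]
    rcases hst : (rest.take k).foldl solStepA ([], [a0], none) with ⟨res, st2⟩
    rcases st2 with ⟨rng, asc⟩
    rw [hst] at hinv
    exact inv_step (a0 :: rest) k res rng asc _ (by simp; omega) hinv

-- definitional unfoldings of the two ports
theorem solution_cons_eq (a0 : Int) (rest : List Int) :
    solution (a0 :: rest) =
      PySem.Str.join "," ((rest.foldl solStepA ([], [a0], none)).1 ++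
        [solFmtA (rest.foldl solStepA ([], [a0], none)).2.1]) := rfl

theorem solution_alt_eq (args : List Int) :
    solution_alt args =
      PySem.Str.join "," (solPieces args
        (((PySem.List.enumerate (solDiffs args) 0).foldl (solBndStep (solDiffs args)) [0]) ++
          [PySem.List.len args])) := rfl

-- ===== VERDICT (by name: the statement is the Claim_ definition above) =====
theorem solution_spec : Claim_equal_solution := by
  intro args _ hpre
  unfold Spec_solution
  unfold Pre_solution at hpre
  cases args with
  | nil => exact absurd hpre (by simp)
  | cons a0 rest =>
    have hdlen : (solDiffs (a0 :: rest)).length = rest.length := by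
      rw [length_solDiffs]; simp
    have henlen : (PySem.List.enumerate (solDiffs (a0 :: rest)) 0).length = rest.length := by
      rw [PySem.List.length_enumerate, hdlen]
    have hK := inv_all a0 rest rest.length (le_refl _)
    rw [List.take_length, List.take_of_length_le (le_of_eq henlen)] at hK
    obtain ⟨s, hs, hk, hblast, hrng, hres, hnone, hconst, hdir⟩ := hK
    have hlena : PySem.List.len (a0 :: rest) = (((rest.length + 1 : Nat)) : Int) := by
      rw [PySem.List.len_eq]; simp
    rw [solution_cons_eq, solution_alt_eq, hlena, hres, hrng,
      solPieces_append (a0 :: rest) _ _ _ hblast]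
    have hfmt := fmt_piece (a0 :: rest) s rest.length hs (by simp) hconst ?_
    · have hcast : ((rest.length : Int) + 1) = ((rest.length + 1 : Nat) : Int) := by
        push_cast; ring
      rw [hcast] at hfmt
      rw [hfmt]
    · intro hslt
      rcases hdir hslt with ⟨hd, _⟩ | ⟨hd, _⟩
      · exact Or.inl hd
      · exact Or.inr hd
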